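-- pv_equiv track=rewrite | github.com/python-feladatok-tesztekkel/kepzes-2024 | 3nap/forditva.py | fordit2
-- ===== SOURCE A (Python) =====
-- def fordit2(szo:str)->str:
--     """_summary_
--
--     Args:
--         szo (str): _description_
--
--     Returns:
--         str: _description_
--     """
--     if (isinstance(szo,str)):
--         ujszo=""
--         for betu in szo[::-1]:
--             if betu.isalpha():
--                 ujszo+=betu
--             else:
--                 break;
--         if (len(ujszo)==len(szo)):
--             return ujszo
--     return "Nem szöveget kaptam!"
-- ===== SOURCE B (Python) =====
-- def fordit2(szo: str) -> str:
--     if isinstance(szo, str) and all(c.isalpha() for c in szo):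
--         return szo[::-1]
--     return "Nem sz\u00f6veget kaptam!"
-- ===== Notes on version B (the rewrite author's own statement) =====
-- stated objective: simpler
-- what changed: Replaces the fused reverse-and-accumulate-until-break loop plus length-equality check with a separate all()-validation pass and a pure slice reversal.
import Mathlib
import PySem

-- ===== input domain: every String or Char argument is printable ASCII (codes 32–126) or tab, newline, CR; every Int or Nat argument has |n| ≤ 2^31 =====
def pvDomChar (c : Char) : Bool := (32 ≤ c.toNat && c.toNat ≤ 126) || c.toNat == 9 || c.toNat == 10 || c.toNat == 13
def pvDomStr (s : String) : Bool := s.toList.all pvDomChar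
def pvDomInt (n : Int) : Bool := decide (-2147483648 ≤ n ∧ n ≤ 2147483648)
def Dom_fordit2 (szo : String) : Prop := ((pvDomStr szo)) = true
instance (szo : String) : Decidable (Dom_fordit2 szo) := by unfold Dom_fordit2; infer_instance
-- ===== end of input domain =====

-- B validates with a single all-alphabetic pass and reverses by slice, replacing A's
-- fused reverse-and-break accumulation loop plus length-equality check (objective: simpler).


-- ===== PORT A =====
-- the 'for betu in szo[::-1]: … else break' loop, accumulating ujszo until a non-letter
def forditLoop : List Char → List Char → List Char
  | [], ujszo => ujszo
  | betu :: rest, ujszo =>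
      if PySem.Chars.isalpha betu then forditLoop rest (ujszo ++ [betu]) else ujszo

def fordit2 (szo : String) : String :=
  let ujszo := forditLoop ((PySem.List.slice? szo.toList none none (-1)).getD []) []
  if ujszo.length = szo.toList.length then String.ofList ujszo
  else "Nem szöveget kaptam!"

-- ===== PORT B =====
def fordit2_alt (szo : String) : String :=
  if szo.toList.all PySem.Chars.isalpha then
    String.ofList ((PySem.List.slice? szo.toList none none (-1)).getD [])
  else "Nem szöveget kaptam!"

-- ===== PRECONDITION & SPEC =====
def Spec_fordit2 (szo : String) (out : String) : Prop := out = fordit2_alt szo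
instance (szo : String) (out : String) : Decidable (Spec_fordit2 szo out) := by unfold Spec_fordit2; infer_instance

-- ===== CLAIM (what is proved, stated in full; the proofs are below) =====
def Claim_equal_fordit2 : Prop := ∀ (szo : String), Dom_fordit2 szo → Spec_fordit2 szo (fordit2 szo)

-- ===== LEMMAS AND PROOFS =====
theorem forditLoop_eq_takeWhile (cs acc : List Char) :
    forditLoop cs acc = acc ++ cs.takeWhile PySem.Chars.isalpha := by
  induction cs generalizing acc with
  | nil => simp [forditLoop]
  | cons c rest ih =>
      simp only [forditLoop, List.takeWhile]
      by_cases h : PySem.Chars.isalpha c = true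
      · simp [h, ih]
      · simp [h]

theorem slice_rev (l : List Char) :
    (PySem.List.slice? l none none (-1)).getD [] = l.reverse := by
  simp [PySem.List.slice?_none_none_neg_one]

-- ===== VERDICT (by name: the statement is the Claim_ definition above) =====
theorem fordit2_spec : Claim_equal_fordit2 := by
  intro szo _
  unfold Spec_fordit2 fordit2 fordit2_alt
  simp only [forditLoop_eq_takeWhile, List.nil_append, slice_rev]
  by_cases hall : szo.toList.all PySem.Chars.isalpha = true
  · have hTW : szo.toList.reverse.takeWhile PySem.Chars.isalpha = szo.toList.reverse := by
      rw [List.takeWhile_eq_self_iff]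
      intro a ha
      exact List.all_eq_true.mp hall a (List.mem_reverse.mp ha)
    simp [hTW, hall]
  · have hlt : (szo.toList.reverse.takeWhile PySem.Chars.isalpha).length ≠ szo.toList.length := by
      intro heq
      have hpre := List.takeWhile_prefix (l := szo.toList.reverse) (p := PySem.Chars.isalpha)
      have := hpre.eq_of_length (by simpa using heq)
      rw [List.takeWhile_eq_self_iff] at this
      exact hall (List.all_eq_true.mpr (fun a ha => this a (List.mem_reverse.mpr ha)))
    simp only [hall, Bool.false_eq_true, if_false, ite_eq_right_iff]
    intro heq
    exact absurd (by simpa using heq) hlt
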